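-- pv_equiv track=rewrite | github.com/Lily-Xiaolei-Li/Veritas | backend/cli/main.py | _apply_aliases
-- ===== SOURCE A (Python) =====
-- def _apply_aliases(arg_list: list[str]) -> list[str]:
--     if not arg_list:
--         return arg_list
--
--     resource_alias = {
--         "sess": "session",
--         "ctx": "context",
--         "src": "source",
--         "pers": "persona",
--         "art": "artifact",
--         "rn": "run",
--         "stat": "status",
--     }
--
--     action_alias_common = {
--         "ls": "list",
--         "cur": "current",
--         "del": "delete",
--     }
--
--     out = list(arg_list)
--
--     # Replace first non-flag token as resource alias.
--     for i, tok in enumerate(out):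
--         if not tok.startswith("-"):
--             out[i] = resource_alias.get(tok, tok)
--             # Next non-flag token is action.
--             for j in range(i + 1, len(out)):
--                 if not out[j].startswith("-"):
--                     act = out[j]
--                     if out[i] == "source" and act == "rm":
--                         out[j] = "remove"
--                     elif out[i] == "artifact" and act == "rm":
--                         out[j] = "delete"
--                     else:
--                         out[j] = action_alias_common.get(act, act)
--                     break
--             break
--
--     return out
-- ===== SOURCE B (Python) =====
-- def _apply_aliases(arg_list: list[str]) -> list[str]:
--     if not arg_list:
--         return arg_list
--
--     resource_alias = {
--         "sess": "session",
--         "ctx": "context",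
--         "src": "source",
--         "pers": "persona",
--         "art": "artifact",
--         "rn": "run",
--         "stat": "status",
--     }
--
--     action_alias_common = {
--         "ls": "list",
--         "cur": "current",
--         "del": "delete",
--     }
--
--     def split_flags(toks):
--         # leading run of "-"-prefixed tokens, and the rest
--         k = 0
--         while k < len(toks) and toks[k].startswith("-"):
--             k += 1
--         return toks[:k], toks[k:]
--
--     pre1, rest1 = split_flags(arg_list)
--     if not rest1:
--         return list(arg_list)
--     res = resource_alias.get(rest1[0], rest1[0])
--
--     pre2, rest2 = split_flags(rest1[1:])
--     if not rest2:
--         return pre1 + [res] + pre2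
--     tok = rest2[0]
--     if res == "source" and tok == "rm":
--         act = "remove"
--     elif res == "artifact" and tok == "rm":
--         act = "delete"
--     else:
--         act = action_alias_common.get(tok, tok)
--     return pre1 + [res] + pre2 + [act] + rest2[1:]
-- ===== Notes on version B (the rewrite author's own statement) =====
-- stated objective: simpler
-- what changed: Replaces A's in-place index loops with nested break (enumerate + inner range scan mutating a copy) by a split-and-concatenate decomposition: split off the leading flag run, rewrite the resource token, split again, rewrite the action token, and rebuild the list by concatenation.
import Mathlib
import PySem

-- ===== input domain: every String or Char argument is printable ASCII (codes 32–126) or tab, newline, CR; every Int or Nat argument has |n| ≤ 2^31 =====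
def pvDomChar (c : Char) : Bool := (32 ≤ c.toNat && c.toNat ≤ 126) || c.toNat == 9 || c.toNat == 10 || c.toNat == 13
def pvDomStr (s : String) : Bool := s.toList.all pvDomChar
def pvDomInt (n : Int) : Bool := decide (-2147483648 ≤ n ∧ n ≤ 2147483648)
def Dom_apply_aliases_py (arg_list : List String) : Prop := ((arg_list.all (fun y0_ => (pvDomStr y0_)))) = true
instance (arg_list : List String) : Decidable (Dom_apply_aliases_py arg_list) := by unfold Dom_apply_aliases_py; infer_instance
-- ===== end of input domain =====

-- B replaces A's in-place index loops with nested break by a split-and-concatenate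
-- decomposition (split off the leading flag run twice, rebuild by concatenation).

-- ===== PORT A =====

def aResAlias : PySem.Dict String String := PySem.Dict.ofList
  [("sess", "session"), ("ctx", "context"), ("src", "source"), ("pers", "persona"),
   ("art", "artifact"), ("rn", "run"), ("stat", "status")]

def aActAlias : PySem.Dict String String := PySem.Dict.ofList
  [("ls", "list"), ("cur", "current"), ("del", "delete")]

-- inner 'for j in range(i+1, len(out)) … break' loop; res = out[i] after the resource rewrite
def aInner (res : String) (out : List String) (j : Nat) : List String :=
  if h : j < out.length then
    let act := out[j]
    if PySem.Str.startswith act "-" then aInner res out (j + 1)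
    else
      out.set j
        (if res = "source" ∧ act = "rm" then "remove"
         else if res = "artifact" ∧ act = "rm" then "delete"
         else aActAlias.getD act act)
  else out
termination_by out.length - j

-- outer 'for i, tok in enumerate(out) … break' loop
def aOuter (out : List String) (i : Nat) : List String :=
  if h : i < out.length then
    let tok := out[i]
    if PySem.Str.startswith tok "-" then aOuter out (i + 1)
    else
      let r := aResAlias.getD tok tok
      aInner r (out.set i r) (i + 1)
  else out
termination_by out.length - i

def apply_aliases_py (arg_list : List String) : List String :=
  if arg_list = [] then arg_list
  else aOuter arg_list 0

-- ===== PORT B =====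

def bResAlias : PySem.Dict String String := PySem.Dict.ofList
  [("sess", "session"), ("ctx", "context"), ("src", "source"), ("pers", "persona"),
   ("art", "artifact"), ("rn", "run"), ("stat", "status")]

def bActAlias : PySem.Dict String String := PySem.Dict.ofList
  [("ls", "list"), ("cur", "current"), ("del", "delete")]

-- length of the leading run of "-"-prefixed tokens (the 'while' counter k)
def bCountFlags : List String → Nat
  | [] => 0
  | h :: t => if PySem.Str.startswith h "-" then bCountFlags t + 1 else 0

def bSplitFlags (toks : List String) : List String × List String :=
  let k := bCountFlags toks
  (toks.take k, toks.drop k)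

def apply_aliases_py_alt (arg_list : List String) : List String :=
  if arg_list = [] then arg_list
  else
    let (pre1, rest1) := bSplitFlags arg_list
    match rest1 with
    | [] => arg_list
    | h1 :: t1 =>
      let res := bResAlias.getD h1 h1
      let (pre2, rest2) := bSplitFlags t1
      match rest2 with
      | [] => pre1 ++ [res] ++ pre2
      | h2 :: t2 =>
        let act :=
          if res = "source" ∧ h2 = "rm" then "remove"
          else if res = "artifact" ∧ h2 = "rm" then "delete"
          else bActAlias.getD h2 h2
        pre1 ++ [res] ++ pre2 ++ [act] ++ t2

-- ===== PRECONDITION & SPEC =====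
def Spec_apply_aliases_py (arg_list : List String) (out : List String) : Prop := out = apply_aliases_py_alt arg_list
instance (arg_list : List String) (out : List String) : Decidable (Spec_apply_aliases_py arg_list out) := by unfold Spec_apply_aliases_py; infer_instance

-- ===== CLAIM (what is proved, stated in full; the proofs are below) =====
def Claim_equal_apply_aliases_py : Prop := ∀ (arg_list : List String), Dom_apply_aliases_py arg_list → Spec_apply_aliases_py arg_list (apply_aliases_py arg_list)

-- ===== LEMMAS AND PROOFS =====

-- proof-only recursive reference forms of the two rewrites
def pRes : List String → List String
  | [] => []
  | h :: t =>
    if PySem.Str.startswith h "-" then h :: pRes t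
    else
      let r := aResAlias.getD h h
      r :: pAct r t
where pAct (res : String) : List String → List String
  | [] => []
  | h :: t =>
    if PySem.Str.startswith h "-" then h :: pAct res t
    else
      (if res = "source" ∧ h = "rm" then "remove"
       else if res = "artifact" ∧ h = "rm" then "delete"
       else aActAlias.getD h h) :: t

lemma aInner_eq (res : String) (out : List String) (j : Nat) :
    aInner res out j = out.take j ++ pRes.pAct res (out.drop j) := by
  fun_induction aInner res out j with
  | case1 j h act hflag ih =>
    rw [ih, List.drop_eq_getElem_cons h, pRes.pAct, if_pos hflag,
        List.take_add_one, List.getElem?_eq_getElem h]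
    simp only [Option.toList_some, List.append_assoc, List.singleton_append]
  | case2 j h act hflag =>
    rw [List.drop_eq_getElem_cons h, pRes.pAct, if_neg hflag,
        List.set_eq_take_append_cons_drop, if_pos h]
  | case3 j h =>
    simp at h
    simp [List.drop_eq_nil_of_le h, List.take_of_length_le h, pRes.pAct]

lemma aOuter_eq (out : List String) (i : Nat) :
    aOuter out i = out.take i ++ pRes (out.drop i) := by
  fun_induction aOuter out i with
  | case1 i h tok hflag ih =>
    rw [ih, List.drop_eq_getElem_cons h, pRes, if_pos hflag,
        List.take_add_one, List.getElem?_eq_getElem h]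
    simp only [Option.toList_some, List.append_assoc, List.singleton_append]
  | case2 i h tok hflag r =>
    have hl : i < (out.set i r).length := by simpa using h
    rw [aInner_eq, List.drop_eq_getElem_cons h, pRes, if_neg hflag,
        List.take_add_one, List.getElem?_eq_getElem hl, List.getElem_set_self,
        List.take_set, List.drop_set_of_lt (Nat.lt_succ_self i),
        List.set_eq_of_length_le (by simp)]
    simp only [Option.toList_some, List.append_assoc, List.singleton_append,
      Nat.succ_eq_add_one]
    rfl
  | case3 i h =>
    simp at h
    simp [List.drop_eq_nil_of_le h, List.take_of_length_le h, pRes]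

lemma bCountFlags_cons_pos {h : String} (t : List String)
    (hf : PySem.Str.startswith h "-" = true) :
    bCountFlags (h :: t) = bCountFlags t + 1 := by
  simp only [bCountFlags, hf, if_true]

lemma bCountFlags_cons_neg {h : String} (t : List String)
    (hf : ¬ PySem.Str.startswith h "-" = true) :
    bCountFlags (h :: t) = 0 := by
  rw [Bool.not_eq_true] at hf
  simp [bCountFlags]
  simpa using hf

lemma pAct_eq (res : String) (toks : List String) :
    pRes.pAct res toks =
      (bSplitFlags toks).1 ++
        (match (bSplitFlags toks).2 with
         | [] => []
         | h :: t =>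
           (if res = "source" ∧ h = "rm" then "remove"
            else if res = "artifact" ∧ h = "rm" then "delete"
            else aActAlias.getD h h) :: t) := by
  induction toks with
  | nil => simp [pRes.pAct, bSplitFlags, bCountFlags]
  | cons h t ih =>
    by_cases hf : PySem.Str.startswith h "-" = true
    · rw [pRes.pAct, if_pos hf, ih]
      simp only [bSplitFlags, bCountFlags_cons_pos t hf, List.take_succ_cons,
        List.drop_succ_cons, List.cons_append]
    · rw [pRes.pAct, if_neg hf]
      simp only [bSplitFlags, bCountFlags_cons_neg t hf, List.take_zero,
        List.drop_zero, List.nil_append]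

lemma pRes_eq (toks : List String) :
    pRes toks =
      (bSplitFlags toks).1 ++
        (match (bSplitFlags toks).2 with
         | [] => []
         | h :: t =>
           let r := aResAlias.getD h h
           r :: pRes.pAct r t) := by
  induction toks with
  | nil => simp [pRes, bSplitFlags, bCountFlags]
  | cons h t ih =>
    by_cases hf : PySem.Str.startswith h "-" = true
    · rw [pRes, if_pos hf, ih]
      simp only [bSplitFlags, bCountFlags_cons_pos t hf, List.take_succ_cons,
        List.drop_succ_cons, List.cons_append]
    · rw [pRes, if_neg hf]
      simp only [bSplitFlags, bCountFlags_cons_neg t hf, List.take_zero,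
        List.drop_zero, List.nil_append]

lemma split_all_flags {toks : List String} (h : (bSplitFlags toks).2 = []) :
    (bSplitFlags toks).1 = toks := by
  have h' : toks.drop (bCountFlags toks) = [] := by simpa [bSplitFlags] using h
  have h2 := List.take_append_drop (bCountFlags toks) toks
  rw [h'] at h2
  simpa [bSplitFlags] using h2

lemma alt_eq_pRes (l : List String) (hne : l ≠ []) :
    apply_aliases_py_alt l = pRes l := by
  unfold apply_aliases_py_alt
  simp only [hne, if_false]
  rw [pRes_eq l]
  rcases hsplit : (bSplitFlags l).2 with _ | ⟨h1, t1⟩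
  · simp only [split_all_flags hsplit, List.append_nil]
  · dsimp only
    rw [pAct_eq]
    rcases hsplit2 : (bSplitFlags t1).2 with _ | ⟨h2, t2⟩
    · have hb : bResAlias = aResAlias := rfl
      simp [hb]
    · have hb : bResAlias = aResAlias := rfl
      have hb2 : bActAlias = aActAlias := rfl
      simp [hb, hb2]

-- ===== VERDICT (by name: the statement is the Claim_ definition above) =====
theorem apply_aliases_py_spec : Claim_equal_apply_aliases_py := by
  intro l _
  unfold Spec_apply_aliases_py apply_aliases_py
  by_cases hne : l = []
  · simp [hne, apply_aliases_py_alt]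
  · simp only [hne, if_false]
    rw [aOuter_eq, alt_eq_pRes l hne]
    simp
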